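-- pv_equiv track=rewrite | github.com/melbournebioinformatics/COMP90014_2025 | tutorials/week2/week2.py | build_hash_table
-- ===== SOURCE A (Python) =====
-- def build_hash_table(kmer_list):
--     # Builds and returns kmer index as hash table.
--     # Collisions resolved using linear probing.
--     kmer_dict = dict()
--     for kmer, loc in kmer_list:
--         # Check if the kmer already exists
--         if kmer in kmer_dict:
--             # Append the location to the list
--             kmer_dict[kmer].append(loc)
--         # Firt time see the kmer
--         else:
--             kmer_dict[kmer] = [loc]
--     return kmer_dict
-- ===== SOURCE B (Python) =====
-- def build_hash_table(kmer_list):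
--     # Two-phase gather: distinct kmers in first-occurrence order, then one
--     # per-key scan collecting that kmer's locations in original order.
--     keys = dict.fromkeys(kmer for kmer, _ in kmer_list)
--     return {kmer: [loc for k, loc in kmer_list if k == kmer] for kmer in keys}
-- ===== Notes on version B (the rewrite author's own statement) =====
-- stated objective: alternative
-- what changed: Replaced A's single hash-bucketing pass (append to a growing dict entry) with a two-phase gather: compute the distinct kmers in first-occurrence order, then build each dict entry by one per-key scan of the input list.
import Mathlib
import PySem

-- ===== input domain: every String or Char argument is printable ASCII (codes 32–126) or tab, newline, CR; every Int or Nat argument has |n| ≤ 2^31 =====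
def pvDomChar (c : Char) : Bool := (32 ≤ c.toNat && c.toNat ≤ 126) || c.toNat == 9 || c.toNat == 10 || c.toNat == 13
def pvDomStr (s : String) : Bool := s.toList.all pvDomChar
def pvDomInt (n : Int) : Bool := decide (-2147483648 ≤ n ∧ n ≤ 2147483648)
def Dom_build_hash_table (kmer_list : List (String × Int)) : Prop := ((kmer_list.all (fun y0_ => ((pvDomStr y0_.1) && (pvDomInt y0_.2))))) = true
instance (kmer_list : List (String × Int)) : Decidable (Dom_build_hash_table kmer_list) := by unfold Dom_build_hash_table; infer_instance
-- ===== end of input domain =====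

-- B replaces A's single dict-bucketing pass with a two-phase gather (distinct keys, then a per-key scan); alternative decomposition, not faster.


-- ===== PORT A =====
-- A: one pass; if the kmer is already a key, append the location, else start a new entry.
def build_hash_table (kmer_list : List (String × Int)) : List (String × List Int) :=
  (kmer_list.foldl
    (fun d p =>
      if d.contains p.1 then d.insert p.1 (d.getD p.1 [] ++ [p.2])
      else d.insert p.1 [p.2])
    (PySem.Dict.empty : PySem.Dict String (List Int))).items

-- ===== PORT B =====
-- B: distinct kmers in first-occurrence order, then gather each kmer's locations by a scan.
def build_hash_table_alt (kmer_list : List (String × Int)) : List (String × List Int) :=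
  (PySem.Set.ofList (kmer_list.map Prod.fst)).map
    (fun kmer => (kmer, (kmer_list.filter (fun p => p.1 == kmer)).map Prod.snd))

-- ===== PRECONDITION & SPEC =====
def Spec_build_hash_table (kmer_list : List (String × Int)) (out : List (String × List Int)) : Prop := out = build_hash_table_alt kmer_list
instance (kmer_list : List (String × Int)) (out : List (String × List Int)) : Decidable (Spec_build_hash_table kmer_list out) := by unfold Spec_build_hash_table; infer_instance

-- ===== CLAIM (what is proved, stated in full; the proofs are below) =====
def Claim_equal_build_hash_table : Prop := ∀ (kmer_list : List (String × Int)), Dom_build_hash_table kmer_list → Spec_build_hash_table kmer_list (build_hash_table kmer_list)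

-- ===== LEMMAS AND PROOFS =====

-- A's if/else step is exactly Dict.modify with default [].
theorem pv_step_eq_modify (d : PySem.Dict String (List Int)) (p : String × Int) :
    (if d.contains p.1 then d.insert p.1 (d.getD p.1 [] ++ [p.2])
     else d.insert p.1 [p.2])
    = d.modify p.1 [] (· ++ [p.2]) := by
  by_cases h : d.contains p.1
  · simp [h, PySem.Dict.modify]
  · have h0 : d.getD p.1 [] = [] := PySem.Dict.getD_of_not_contains d [] (by simpa using h)
    simp [h, PySem.Dict.modify, h0]

-- ===== VERDICT (by name: the statement is the Claim_ definition above) =====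
theorem build_hash_table_spec : Claim_equal_build_hash_table := by
  intro xs _
  show build_hash_table xs = build_hash_table_alt xs
  unfold build_hash_table build_hash_table_alt
  have hstep : xs.foldl
      (fun d p =>
        if d.contains p.1 then d.insert p.1 (d.getD p.1 [] ++ [p.2])
        else d.insert p.1 [p.2])
      (PySem.Dict.empty : PySem.Dict String (List Int))
      = xs.foldl (fun d p => d.modify p.1 [] (· ++ [p.2])) PySem.Dict.empty := by
    have : (fun (d : PySem.Dict String (List Int)) (p : String × Int) =>
        if d.contains p.1 then d.insert p.1 (d.getD p.1 [] ++ [p.2])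
        else d.insert p.1 [p.2]) = fun d p => d.modify p.1 [] (· ++ [p.2]) := by
      funext d p; exact pv_step_eq_modify d p
    rw [this]
  rw [hstep]
  set D := xs.foldl (fun d p => d.modify p.1 [] (· ++ [p.2]))
    (PySem.Dict.empty : PySem.Dict String (List Int)) with hD
  have hnd : D.keys.Nodup := by
    rw [hD]
    exact PySem.Dict.nodup_keys_foldl_modify_key xs Prod.fst [] (fun d p => (· ++ [p.2]))
      PySem.Dict.empty PySem.Dict.nodup_keys_empty
  have hkeys : D.keys = PySem.Set.ofList (xs.map Prod.fst) := by
    rw [hD, PySem.Dict.keys_foldl_modify_key]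
    simp [PySem.Dict.keys_empty, PySem.Set.update_nil_left]
  rw [PySem.Dict.items_eq_map_keys D hnd [], hkeys]
  apply List.map_congr_left
  intro k _
  have hg : D.getD k [] = ([] : List Int) ++ (xs.filter (fun p => p.1 == k)).map (·.2) := by
    rw [hD]
    exact PySem.Dict.getD_foldl_modify_append xs PySem.Dict.empty k
  simp only [List.nil_append] at hg
  simp [hg]
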